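-- pv_equiv track=rewrite | github.com/naver/claf | claf/data/utils.py | get_is_head_of_word
-- ===== SOURCE A (Python) =====
-- def get_is_head_of_word(naive_tokens, sequence_tokens):
--     """
--     Return a list of flags whether the token is head(prefix) of naively split tokens
--
--     ex) naive_tokens: ["hello.", "how", "are", "you?"]
--         sequence_tokens: ["hello", ".", "how", "are", "you", "?"]
--
--         => [1, 0, 1, 1, 1, 0]
--
--     * Args:
--         naive_tokens: a list of tokens, naively split by whitespace
--         sequence_tokens: a list of tokens, split by 'word_tokenizer'
--
--     * Returns:
--         is_head_of_word: a list with its length the same as that of 'sequence_tokens'.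
--             has 1 if the tokenized word at the position is head(prefix) of a `naive_token`
--             and 0 if otherwise.
--     """
--
--     is_head_of_word = []
--     for naive_token in naive_tokens:
--         consumed_chars = 0
--         consumed_words = 0
--         for sequence_token in sequence_tokens:
--             if naive_token[consumed_chars:].startswith(sequence_token):
--                 is_head_of_word.append(0 if consumed_chars else 1)
--                 consumed_chars += len(sequence_token)
--                 consumed_words += 1
--             else:
--                 break
--         sequence_tokens = sequence_tokens[consumed_words:]
--     return is_head_of_word
-- ===== SOURCE B (Python) =====
-- def get_is_head_of_word(naive_tokens, sequence_tokens):
--     # Flatten sequence_tokens into one string plus a prefix-sum offset table; per naive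
--     # word compute one longest-common-prefix against the flat string and consume a whole
--     # run of tokens by integer comparisons on the offset table (no per-token string ops).
--     off = [0]
--     for t in sequence_tokens:
--         off.append(off[-1] + len(t))
--     s = "".join(sequence_tokens)
--     flags = []
--     j = 0
--     n = len(sequence_tokens)
--     for w in naive_tokens:
--         p = off[j]
--         # longest common prefix of w and s[p:]
--         lcp = 0
--         while lcp < len(w) and p + lcp < len(s) and w[lcp] == s[p + lcp]:
--             lcp += 1
--         limit = p + lcp
--         while j < n and off[j + 1] <= limit:
--             flags.append(1 if off[j] == p else 0)
--             j += 1
--     return flags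
-- ===== Notes on version B (the rewrite author's own statement) =====
-- stated objective: faster
-- what changed: B flattens sequence_tokens once into a single string with a prefix-sum offset table, computes per naive word one longest-common-prefix against the flat string, and then consumes a whole run of tokens purely by integer comparisons on the offset table, instead of A's nested loop that re-slices the token list and calls startswith per token per word.
import Mathlib
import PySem

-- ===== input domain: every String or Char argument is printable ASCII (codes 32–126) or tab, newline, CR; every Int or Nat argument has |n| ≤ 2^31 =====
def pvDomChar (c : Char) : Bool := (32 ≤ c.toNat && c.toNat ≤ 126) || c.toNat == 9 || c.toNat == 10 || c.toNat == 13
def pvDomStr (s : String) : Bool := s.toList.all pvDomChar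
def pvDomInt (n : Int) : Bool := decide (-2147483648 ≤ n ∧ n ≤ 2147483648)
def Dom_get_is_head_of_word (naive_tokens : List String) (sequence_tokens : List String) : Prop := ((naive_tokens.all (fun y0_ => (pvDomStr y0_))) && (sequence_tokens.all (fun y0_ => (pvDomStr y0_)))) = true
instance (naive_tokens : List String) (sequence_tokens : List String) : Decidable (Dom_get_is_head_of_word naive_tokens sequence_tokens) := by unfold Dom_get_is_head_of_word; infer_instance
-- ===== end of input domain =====

-- B replaces A's nested token-list re-slicing scan by a flat concatenation of
-- sequence_tokens plus a prefix-sum offset table: one longest-common-prefix per word,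
-- then whole runs of tokens consumed by integer comparisons (objective: faster).

-- ===== PORT A =====
-- inner 'for sequence_token in sequence_tokens: … else break' loop; returns
-- (is_head_of_word, consumed_words).  w[cc:] with cc ≥ 0 (a Nat here) is exactly drop cc.
def pvInnerA (w : List Char) (seq : List String) (cc : Nat) (flags : List Int) : List Int × Nat :=
  match seq with
  | [] => (flags, 0)
  | t :: rest =>
    if PySem.Chars.startswith (w.drop cc) t.toList then
      let r := pvInnerA w rest (cc + t.toList.length) (flags ++ [if cc = 0 then 1 else 0])
      (r.1, r.2 + 1)
    else
      (flags, 0)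

-- outer 'for naive_token in naive_tokens' loop; sequence_tokens[cw:] with cw ≥ 0 is drop cw.
def pvOuterA (naive : List String) (seq : List String) (flags : List Int) : List Int :=
  match naive with
  | [] => flags
  | w :: ws =>
    let r := pvInnerA w.toList seq 0 flags
    pvOuterA ws (seq.drop r.2) r.1

def get_is_head_of_word (naive_tokens : List String) (sequence_tokens : List String) : List Int :=
  pvOuterA naive_tokens sequence_tokens []

-- ===== PORT B =====
-- off = [0]; for t in sequence_tokens: off.append(off[-1] + len(t))
def pvOffB (seq : List String) : List Nat :=
  seq.foldl (fun off t => off ++ [off.getLastD 0 + t.toList.length]) [0]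

-- s = "".join(sequence_tokens)
def pvJoinB (seq : List String) : List Char := (seq.map String.toList).flatten

-- the 'while lcp < len(w) and p+lcp < len(s) and w[lcp] == s[p+lcp]' counter loop,
-- as the obvious structural recursion on w and s[p:] (the caller passes s.drop p,
-- exact since 0 ≤ p ≤ len(s) there)
def pvLcpB (w s : List Char) : Nat :=
  match w, s with
  | a :: w', b :: s' => if a = b then pvLcpB w' s' + 1 else 0
  | _, _ => 0

-- the 'while j < n and off[j+1] <= limit' consuming loop; returns (j, flags)
def pvConsumeB (off : List Nat) (n p limit j : Nat) (flags : List Int) : Nat × List Int :=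
  if h : j < n ∧ off.getD (j + 1) 0 ≤ limit then
    pvConsumeB off n p limit (j + 1) (flags ++ [if off.getD j 0 = p then 1 else 0])
  else (j, flags)
termination_by n - j
decreasing_by omega

-- the 'for w in naive_tokens' loop carrying (j, flags)
def pvOuterB (off : List Nat) (s : List Char) (n : Nat) : List String → Nat → List Int → List Int
  | [], _, flags => flags
  | w :: ws, j, flags =>
    let p := off.getD j 0
    let lcp := pvLcpB w.toList (s.drop p)
    let r := pvConsumeB off n p (p + lcp) j flags
    pvOuterB off s n ws r.1 r.2

def get_is_head_of_word_alt (naive_tokens : List String) (sequence_tokens : List String) : List Int :=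
  pvOuterB (pvOffB sequence_tokens) (pvJoinB sequence_tokens) sequence_tokens.length naive_tokens 0 []

-- ===== PRECONDITION & SPEC =====
def Spec_get_is_head_of_word (naive_tokens : List String) (sequence_tokens : List String) (out : List Int) : Prop := out = get_is_head_of_word_alt naive_tokens sequence_tokens
instance (naive_tokens : List String) (sequence_tokens : List String) (out : List Int) : Decidable (Spec_get_is_head_of_word naive_tokens sequence_tokens out) := by unfold Spec_get_is_head_of_word; infer_instance

-- ===== CLAIM (what is proved, stated in full; the proofs are below) =====
def Claim_equal_get_is_head_of_word : Prop := ∀ (naive_tokens : List String) (sequence_tokens : List String), Dom_get_is_head_of_word naive_tokens sequence_tokens → Spec_get_is_head_of_word naive_tokens sequence_tokens (get_is_head_of_word naive_tokens sequence_tokens)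

-- ===== LEMMAS AND PROOFS =====

-- sum of the lengths of the first i sequence tokens
def pvSum (seq : List String) (i : Nat) : Nat :=
  ((seq.take i).map (fun t => t.toList.length)).sum

lemma pvSum_zero (seq : List String) : pvSum seq 0 = 0 := rfl

lemma pvSum_succ (seq : List String) (j : Nat) (h : j < seq.length) :
    pvSum seq (j + 1) = pvSum seq j + (seq[j]'h).toList.length := by
  unfold pvSum
  rw [List.take_add_one, List.getElem?_eq_getElem h, List.map_append, List.sum_append]
  simp

-- the offset table is the table of prefix sums
lemma pvOffB_go (ts : List String) : ∀ (acc : List Nat) (c : Nat), acc.getLastD 0 = c →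
    ts.foldl (fun off t => off ++ [off.getLastD 0 + t.toList.length]) acc
      = acc ++ (List.range ts.length).map (fun i => c + pvSum ts (i + 1)) := by
  induction ts with
  | nil => intro acc c _; simp
  | cons t ts ih =>
    intro acc c hc
    simp only [List.foldl_cons, hc]
    rw [ih (acc ++ [c + t.toList.length]) (c + t.toList.length) List.getLastD_concat]
    rw [List.append_assoc]
    congr 1
    rw [List.length_cons, List.range_succ_eq_map, List.map_cons, List.map_map]
    have h1 : c + pvSum (t :: ts) (0 + 1) = c + t.toList.length := by simp [pvSum]
    have h2 : ((fun i => c + pvSum (t :: ts) (i + 1)) ∘ (· + 1))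
        = fun i => c + t.toList.length + pvSum ts (i + 1) := by
      funext i
      simp only [Function.comp, pvSum, List.take_succ_cons, List.map_cons, List.sum_cons]
      omega
    rw [h1, h2]
    rfl

lemma pvOffB_getD (seq : List String) (i : Nat) (h : i ≤ seq.length) :
    (pvOffB seq).getD i 0 = pvSum seq i := by
  unfold pvOffB
  rw [pvOffB_go seq [0] 0 rfl]
  cases i with
  | zero => simp [pvSum_zero]
  | succ k =>
    have hk : k < seq.length := by omega
    have hlen : k < ((List.range seq.length).map (fun i => 0 + pvSum seq (i + 1))).length := by
      simpa using hk
    simp only [List.singleton_append, List.getD_cons_succ]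
    rw [List.getD_eq_getElem _ _ hlen]
    simp

-- dropping the first j tokens' worth of characters from the flat string
lemma pvJoinB_drop (seq : List String) : ∀ j, (pvJoinB seq).drop (pvSum seq j)
    = ((seq.drop j).map String.toList).flatten := by
  induction seq with
  | nil => intro j; simp [pvJoinB, pvSum]
  | cons t ts ih =>
    intro j
    cases j with
    | zero => simp [pvSum_zero, pvJoinB]
    | succ k =>
      have hs : pvSum (t :: ts) (k + 1) = t.toList.length + pvSum ts k := by
        simp [pvSum, List.take_succ_cons]
      have hj : pvJoinB (t :: ts) = t.toList ++ pvJoinB ts := by simp [pvJoinB]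
      rw [hs, hj, List.drop_length_add_append, ih k]
      simp

-- lcp over a common prefix
lemma pvLcpB_common (c : List Char) : ∀ w s, pvLcpB (c ++ w) (c ++ s) = c.length + pvLcpB w s := by
  induction c with
  | nil => intro w s; simp
  | cons a c ih =>
    intro w s
    have hstep : pvLcpB (a :: (c ++ w)) (a :: (c ++ s)) = pvLcpB (c ++ w) (c ++ s) + 1 := by
      simp [pvLcpB]
    simp only [List.cons_append, hstep, ih, List.length_cons]
    omega

-- a block of tokens fits below the lcp iff its concatenation is a prefix
lemma pvLcpB_ge_iff (t : List Char) : ∀ x r, (t.length ≤ pvLcpB x (t ++ r)) ↔ t <+: x := by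
  induction t with
  | nil => intro x r; simp
  | cons b t ih =>
    intro x r
    cases x with
    | nil => simp [pvLcpB]
    | cons a x =>
      by_cases hab : a = b
      · subst hab
        have hstep : pvLcpB (a :: x) (a :: (t ++ r)) = pvLcpB x (t ++ r) + 1 := by
          simp [pvLcpB]
        rw [List.cons_append, hstep, List.cons_prefix_cons]
        simp only [List.length_cons, Nat.add_le_add_iff_right]
        simp [ih x r]
      · have hstep : pvLcpB (a :: x) (b :: (t ++ r)) = 0 := by
          simp [pvLcpB, fun h : a = b => hab h]
        rw [List.cons_append, hstep, List.cons_prefix_cons]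
        simp only [List.length_cons]
        constructor
        · intro h; omega
        · rintro ⟨h, -⟩; exact absurd h.symm hab

-- the consume loop never moves j backwards and never past n
lemma pvConsumeB_bounds (off : List Nat) (n p limit : Nat) :
    ∀ fuel j flags, n - j = fuel → j ≤ n →
      j ≤ (pvConsumeB off n p limit j flags).1 ∧ (pvConsumeB off n p limit j flags).1 ≤ n := by
  intro fuel
  induction fuel with
  | zero =>
    intro j flags hf hj
    have hcond : ¬ (j < n ∧ off.getD (j + 1) 0 ≤ limit) := fun hcon => absurd hcon.1 (by omega)
    rw [pvConsumeB, dif_neg hcond]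
    exact ⟨Nat.le_refl j, hj⟩
  | succ k ih =>
    intro j flags hf hj
    rw [pvConsumeB]
    by_cases h : j < n ∧ off.getD (j + 1) 0 ≤ limit
    · rw [dif_pos h]
      have := ih (j + 1) (flags ++ [if off.getD j 0 = p then 1 else 0]) (by omega) (by omega)
      omega
    · rw [dif_neg h]
      exact ⟨Nat.le_refl j, hj⟩

-- core: one run of A's inner loop on the token suffix equals B's consume loop
lemma inner_eq (seq : List String) (p : Nat) (w : List Char) :
    ∀ fuel j, seq.length - j = fuel → j ≤ seq.length →
    ∀ (c rest : List Char) (flags : List Int),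
      w = c ++ rest →
      pvSum seq j = p + c.length →
      (pvJoinB seq).drop p = c ++ ((seq.drop j).map String.toList).flatten →
      pvInnerA w (seq.drop j) c.length flags
        = ((pvConsumeB (pvOffB seq) seq.length p (p + pvLcpB w ((pvJoinB seq).drop p)) j flags).2,
           (pvConsumeB (pvOffB seq) seq.length p (p + pvLcpB w ((pvJoinB seq).drop p)) j flags).1 - j) := by
  intro fuel
  induction fuel with
  | zero =>
    intro j hf hj c rest flags hw hsum hdrop
    have hjn : j = seq.length := by omega
    have hnil : seq.drop j = [] := by simp [hjn]
    have hcond : ¬ (j < seq.length ∧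
        (pvOffB seq).getD (j + 1) 0 ≤ p + pvLcpB w ((pvJoinB seq).drop p)) :=
      fun hcon => absurd hcon.1 (by omega)
    rw [hnil, pvConsumeB, dif_neg hcond]
    simp [pvInnerA]
  | succ k ih =>
    intro j hf hj c rest flags hw hsum hdrop
    have hjn : j < seq.length := by omega
    have hcons : seq.drop j = (seq[j]'hjn) :: seq.drop (j + 1) := List.drop_eq_getElem_cons hjn
    have htail : ((seq.drop j).map String.toList).flatten
        = (seq[j]'hjn).toList ++ ((seq.drop (j + 1)).map String.toList).flatten := by
      rw [hcons, List.map_cons, List.flatten_cons]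
    have hlcp : pvLcpB w ((pvJoinB seq).drop p)
        = c.length + pvLcpB rest
            ((seq[j]'hjn).toList ++ ((seq.drop (j + 1)).map String.toList).flatten) := by
      rw [hdrop, htail, hw, pvLcpB_common]
    have hoff1 : (pvOffB seq).getD (j + 1) 0 = p + c.length + (seq[j]'hjn).toList.length := by
      rw [pvOffB_getD seq (j + 1) (by omega), pvSum_succ seq j hjn, hsum]
    have hoffj : (pvOffB seq).getD j 0 = p + c.length := by
      rw [pvOffB_getD seq j (by omega), hsum]
    have hcondB : ((pvOffB seq).getD (j + 1) 0 ≤ p + pvLcpB w ((pvJoinB seq).drop p))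
        ↔ (seq[j]'hjn).toList <+: rest := by
      rw [hoff1, hlcp]
      constructor
      · intro h
        exact (pvLcpB_ge_iff (seq[j]'hjn).toList rest
          ((seq.drop (j + 1)).map String.toList).flatten).mp (by omega)
      · intro h
        have := (pvLcpB_ge_iff (seq[j]'hjn).toList rest
          ((seq.drop (j + 1)).map String.toList).flatten).mpr h
        omega
    have hwdrop : w.drop c.length = rest := by rw [hw]; simp
    rw [hcons, pvConsumeB]
    by_cases hpre : (seq[j]'hjn).toList <+: rest
    · have hsw : PySem.Chars.startswith rest (seq[j]'hjn).toList = true :=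
        (PySem.Chars.startswith_iff rest (seq[j]'hjn).toList).mpr hpre
      have hB : j < seq.length ∧
          (pvOffB seq).getD (j + 1) 0 ≤ p + pvLcpB w ((pvJoinB seq).drop p) :=
        ⟨hjn, hcondB.mpr hpre⟩
      rw [dif_pos hB]
      simp only [pvInnerA, hwdrop, hsw, if_true]
      obtain ⟨rest', hrest⟩ := hpre
      have hflag : ((if c.length = 0 then (1 : Int) else 0))
          = (if (pvOffB seq).getD j 0 = p then (1 : Int) else 0) := by
        rw [hoffj]
        by_cases hc : c.length = 0 <;> simp [hc]
      have hih := ih (j + 1) (by omega) (by omega) (c ++ (seq[j]'hjn).toList) rest'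
        (flags ++ [if (pvOffB seq).getD j 0 = p then (1 : Int) else 0])
        (by rw [hw, ← hrest]; simp [List.append_assoc])
        (by rw [pvSum_succ seq j hjn, hsum]; simp [List.length_append]; omega)
        (by rw [hdrop, htail]; simp [List.append_assoc])
      have hcc : c.length + (seq[j]'hjn).toList.length = (c ++ (seq[j]'hjn).toList).length := by
        simp
      rw [hflag, hcc, hih]
      have hge := pvConsumeB_bounds (pvOffB seq) seq.length p
        (p + pvLcpB w ((pvJoinB seq).drop p)) (seq.length - (j + 1)) (j + 1)
        (flags ++ [if (pvOffB seq).getD j 0 = p then (1 : Int) else 0]) rfl (by omega)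
      rw [Prod.ext_iff]
      refine ⟨rfl, ?_⟩
      simp only []
      omega
    · have hsw : PySem.Chars.startswith rest (seq[j]'hjn).toList = false := by
        rw [← Bool.not_eq_true, PySem.Chars.startswith_iff]; exact hpre
      have hB : ¬ (j < seq.length ∧
          (pvOffB seq).getD (j + 1) 0 ≤ p + pvLcpB w ((pvJoinB seq).drop p)) := by
        intro h; exact hpre (hcondB.mp h.2)
      rw [dif_neg hB]
      simp [pvInnerA, hwdrop, hsw]

-- A's outer loop on the token suffix seq.drop j is B's outer loop started at pointer j
lemma outer_eq (seq : List String) :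
    ∀ (naive : List String) (j : Nat) (flags : List Int), j ≤ seq.length →
      pvOuterA naive (seq.drop j) flags
        = pvOuterB (pvOffB seq) (pvJoinB seq) seq.length naive j flags := by
  intro naive
  induction naive with
  | nil => intro j flags _; rfl
  | cons w ws ih =>
    intro j flags hj
    rw [pvOuterA, pvOuterB]
    have hp : (pvOffB seq).getD j 0 = pvSum seq j := pvOffB_getD seq j hj
    have hdrop : (pvJoinB seq).drop (pvSum seq j)
        = [] ++ ((seq.drop j).map String.toList).flatten := by
      rw [pvJoinB_drop seq j]; rfl
    have hin := inner_eq seq (pvSum seq j) w.toList (seq.length - j) j rfl hj [] w.toList flags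
      (by simp) (by simp [pvSum]) hdrop
    simp only [List.length_nil] at hin
    simp only [hp]
    have h1 : (pvInnerA w.toList (seq.drop j) 0 flags).1
        = (pvConsumeB (pvOffB seq) seq.length (pvSum seq j)
            (pvSum seq j + pvLcpB w.toList ((pvJoinB seq).drop (pvSum seq j))) j flags).2 := by
      rw [hin]
    have h2 : (pvInnerA w.toList (seq.drop j) 0 flags).2
        = (pvConsumeB (pvOffB seq) seq.length (pvSum seq j)
            (pvSum seq j + pvLcpB w.toList ((pvJoinB seq).drop (pvSum seq j))) j flags).1 - j := by
      rw [hin]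
    have hge := pvConsumeB_bounds (pvOffB seq) seq.length (pvSum seq j)
      (pvSum seq j + pvLcpB w.toList ((pvJoinB seq).drop (pvSum seq j)))
      (seq.length - j) j flags rfl hj
    rw [h1, h2, List.drop_drop]
    have hjj : j + ((pvConsumeB (pvOffB seq) seq.length (pvSum seq j)
        (pvSum seq j + pvLcpB w.toList ((pvJoinB seq).drop (pvSum seq j))) j flags).1 - j)
        = (pvConsumeB (pvOffB seq) seq.length (pvSum seq j)
            (pvSum seq j + pvLcpB w.toList ((pvJoinB seq).drop (pvSum seq j))) j flags).1 := by
      omega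
    rw [hjj]
    exact ih _ _ (by omega)

-- ===== VERDICT (by name: the statement is the Claim_ definition above) =====
theorem get_is_head_of_word_spec : Claim_equal_get_is_head_of_word := by
  intro naive seq _
  unfold Spec_get_is_head_of_word get_is_head_of_word get_is_head_of_word_alt
  have := outer_eq seq naive 0 [] (by omega)
  simpa using this
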